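-- pv_equiv track=rewrite | github.com/ece-jacob-scott/advent-of-code | year-2022/day-5/main.py | prompt_two
-- ===== SOURCE A (Python) =====
-- from typing import List
--
-- def parse_crates(input_lines: List[str]) -> List[List[str]]:
--     crates = []
--
--     previous_line = ""
--     for line in input_lines:
--         if line == "":
--             break
--         previous_line = line
--
--     stack_limit = int(list(filter(lambda x: x != "", list(previous_line)))[-1])
--
--     for line in input_lines:
--         if line == "":
--             break
--         line_chunks = list(line)
--
--         stack = [""] * stack_limit
--         j = 0
--         for i in range(1, len(line_chunks), 4):
--             stack[j] = line_chunks[i].strip()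
--             j += 1
--
--         crates.append(stack)
--
--     crates.pop()
--
--     # take array of rows and make array of cols
--     crate_cols = []
--     for i in range(stack_limit):
--         crate_cols.append([])
--
--     crates.reverse()
--     for i in range(len(crates)):
--         for j in range(len(crates[i])):
--             if crates[i][j] == "":
--                 continue
--             crate_cols[j].append(crates[i][j])
--
--     return crate_cols
--
-- def prompt_two(input_lines: List[str]):
--     crate_stacks = parse_crates(input_lines)
--
--     # only work on moves
--     move_line = False
--     for move in input_lines:
--         if not move_line:
--             if move == "":
--                 move_line = True
--             continue
--
--         (_, amount, _, from_column, _, to_column) = move.split(" ")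
--
--         stack = []
--         for i in range(int(amount)):
--             stack.append(crate_stacks[int(from_column) - 1].pop())
--         for i in range(int(amount)):
--             crate_stacks[int(to_column) - 1].append(stack.pop())
--
--     return "".join(list(map(lambda x: x.pop(), crate_stacks)))
-- ===== SOURCE B (Python) =====
-- from typing import List
--
-- def prompt_two(input_lines: List[str]):
--     sep = input_lines.index("") if "" in input_lines else len(input_lines)
--     header = input_lines[:sep]
--     limit = int(header[-1][-1])
--     # build each column directly, reading the crate rows bottom-up
--     stacks = [
--         [row[i] for row in reversed(header[:-1]) if i < len(row) and not row[i].isspace()]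
--         for i in range(1, 4 * limit, 4)
--     ]
--     for move in input_lines[sep + 1:]:
--         words = move.split(" ")
--         n, a, b = int(words[1]), int(words[3]), int(words[5])
--         if n > 0:
--             stacks[a - 1], moved = stacks[a - 1][:-n], stacks[a - 1][-n:]
--             stacks[b - 1] = stacks[b - 1] + moved
--     return "".join(s[-1] for s in stacks)
-- ===== Notes on version B (the rewrite author's own statement) =====
-- stated objective: idiomatic
-- what changed: B locates the blank separator with index() (defaulting to the end when absent), slices header/moves apart, builds each crate column directly by reading character positions 1,5,9,... bottom-up (no padded rows, no transpose fold, no blank-cell sentinel strings), and executes each move with one list slice instead of A's pop-one-at-a-time into a temporary stack and push-back loops.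
-- outside the precondition, e.g. on prompt_two(['[A] [B]', '2', '', 'move 0 from x to y']): A returns 'AB', B raises ValueError
import Mathlib
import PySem

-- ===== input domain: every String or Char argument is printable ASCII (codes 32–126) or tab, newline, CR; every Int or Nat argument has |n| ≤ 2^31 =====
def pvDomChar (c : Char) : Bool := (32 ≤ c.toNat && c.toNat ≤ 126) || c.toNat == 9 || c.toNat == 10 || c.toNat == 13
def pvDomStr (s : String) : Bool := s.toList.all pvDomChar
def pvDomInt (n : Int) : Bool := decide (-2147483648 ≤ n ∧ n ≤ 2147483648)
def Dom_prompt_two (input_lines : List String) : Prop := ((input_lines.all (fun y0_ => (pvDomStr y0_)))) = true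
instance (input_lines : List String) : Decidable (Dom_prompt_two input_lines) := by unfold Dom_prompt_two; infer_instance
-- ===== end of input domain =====

-- B rebuilds the crate columns directly (index/slice decomposition, per-column comprehension,
-- slice-based moves) instead of A's padded-row transpose and pop/push loops; equal return value on Pre_.

-- ===== PORT A =====

-- previous_line loop (breaks at the first empty line)
def pvPrevLine : List String → String → String
  | [], p => p
  | l :: ls, p => if l = "" then p else pvPrevLine ls l

-- int(list(filter(lambda x: x != "", list(previous_line)))[-1])  (IndexError/ValueError → Pre_)
def pvStackLimitA (prev : String) : Int :=
  let chars := (prev.toList.map (fun c => String.ofList [c])).filter (fun s => !(s == ""))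
  match PySem.List.pyGet? chars (-1) with
  | some s => (PySem.Int.ofStr? s).getD 0
  | none => 0

-- for i in range(1, len(line_chunks), 4): stack[j] = line_chunks[i].strip(); j += 1
def pvRowLoopA (cs : List Char) (stack : List String) (i j : Nat) : List String :=
  if h : i < cs.length then
    pvRowLoopA cs (stack.set j (PySem.Str.strip (String.ofList [cs[i]]))) (i + 4) (j + 1)
  else stack
termination_by cs.length - i
decreasing_by omega

-- the rows loop of parse_crates (breaks at the first empty line)
def pvRowsA (limit : Nat) : List String → List (List String)
  | [] => []
  | l :: ls =>
    if l = "" then []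
    else pvRowLoopA l.toList (List.replicate limit "") 1 0 :: pvRowsA limit ls

-- inner transpose loop: crate_cols[j].append(crates[i][j]) unless the entry is ""
def pvAddRowA : List (List String) → List String → Nat → List (List String)
  | cols, [], _ => cols
  | cols, e :: rest, j =>
    pvAddRowA (if e = "" then cols else cols.set j (cols.getD j [] ++ [e])) rest (j + 1)

-- for i in range(int(amount)): stack.append(crate_stacks[int(from_column) - 1].pop())
def pvPopLoopA (fromc : String) : Nat → List (List String) × List String → List (List String) × List String
  | 0, st => st
  | k + 1, (cols, stack) =>
    let idx : Int := (PySem.Int.ofStr? fromc).getD 0 - 1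
    let col := PySem.List.pyGetD cols idx []
    pvPopLoopA fromc k (PySem.List.pySetD cols idx col.dropLast, stack ++ [col.getLastD ""])

-- for i in range(int(amount)): crate_stacks[int(to_column) - 1].append(stack.pop())
def pvPushLoopA (toc : String) : Nat → List (List String) × List String → List (List String) × List String
  | 0, st => st
  | k + 1, (cols, stack) =>
    let idx : Int := (PySem.Int.ofStr? toc).getD 0 - 1
    let col := PySem.List.pyGetD cols idx []
    pvPushLoopA toc k (PySem.List.pySetD cols idx (col ++ [stack.getLastD ""]), stack.dropLast)

def pvApplyMoveA (cols : List (List String)) (m : String) : List (List String) :=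
  match PySem.Str.split? m " " with
  | some [_, amount, _, fromc, _, toc] =>
    let n := ((PySem.Int.ofStr? amount).getD 0).toNat
    let st := pvPopLoopA fromc n (cols, [])
    (pvPushLoopA toc n st).1
  | _ => cols   -- tuple-unpack ValueError: excluded by Pre_

-- the move loop with its move_line flag
def pvMovesA : List (List String) → List String → Bool → List (List String)
  | cols, [], _ => cols
  | cols, m :: ms, moveLine =>
    if moveLine then pvMovesA (pvApplyMoveA cols m) ms moveLine
    else pvMovesA cols ms (m == "")

def prompt_two (input_lines : List String) : String :=
  let previous_line := pvPrevLine input_lines ""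
  let stack_limit := (pvStackLimitA previous_line).toNat
  let crates := (pvRowsA stack_limit input_lines).dropLast
  let crate_cols := crates.reverse.foldl (fun cols row => pvAddRowA cols row 0) (List.replicate stack_limit [])
  let crate_stacks := pvMovesA crate_cols input_lines false
  PySem.Str.join "" (crate_stacks.map (fun x => x.getLastD ""))

-- ===== PORT B =====

-- [row[i] for row in rows_rev if i < len(row) and not row[i].isspace()]
def pvColB (rowsRev : List String) (i : Int) : List Char :=
  rowsRev.filterMap (fun row =>
    match PySem.List.pyGet? row.toList i with
    | some c => if PySem.Chars.isspace c then none else some c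
    | none => none)

def pvApplyMoveB (sts : List (List Char)) (m : String) : List (List Char) :=
  let words := (PySem.Str.split? m " ").getD []
  let n := (PySem.Int.ofStr? (PySem.List.pyGetD words 1 "")).getD 0
  let a := (PySem.Int.ofStr? (PySem.List.pyGetD words 3 "")).getD 0
  let b := (PySem.Int.ofStr? (PySem.List.pyGetD words 5 "")).getD 0
  if 0 < n then
    let colA := PySem.List.pyGetD sts (a - 1) []
    let moved := PySem.List.slice colA (some (-n)) none
    let sts1 := PySem.List.pySetD sts (a - 1) (PySem.List.slice colA none (some (-n)))
    let colB := PySem.List.pyGetD sts1 (b - 1) []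
    PySem.List.pySetD sts1 (b - 1) (colB ++ moved)
  else sts

def prompt_two_alt (input_lines : List String) : String :=
  let sep : Nat :=
    if input_lines.contains "" then (PySem.List.index? input_lines "").getD 0
    else input_lines.length
  let header := PySem.List.slice input_lines none (some (sep : Int))
  let limit : Int :=
    match PySem.List.pyGet? header (-1) with
    | none => 0
    | some last =>
      match PySem.List.pyGet? last.toList (-1) with
      | none => 0
      | some c => (PySem.Int.ofStr? (String.ofList [c])).getD 0
  let rowsRev := (PySem.List.slice header none (some (-1))).reverse
  let sts := (PySem.List.pyRange 1 (4 * limit) 4).map (fun i => pvColB rowsRev i)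
  let sts := (PySem.List.slice input_lines (some ((sep : Int) + 1)) none).foldl pvApplyMoveB sts
  PySem.Str.join "" (sts.map (fun s => String.ofList (PySem.List.pyGet? s (-1)).toList))

-- ===== PRECONDITION & SPEC =====

-- Python index resolution for an in-range (possibly negative) index
def pvResolve (L : Nat) (i : Int) : Nat := (if i < 0 then i + L else i).toNat

def pvMoveFields (m : String) : Option (Int × Int × Int) :=
  match PySem.Str.split? m " " with
  | some [_, a1, _, a3, _, a5] =>
    match PySem.Int.ofStr? a1, PySem.Int.ofStr? a3, PySem.Int.ofStr? a5 with
    | some n, some a, some t => some (n, a, t)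
    | _, _, _ => none
  | _ => none

-- move line shape: 6 space-separated fields, int-parsable amount and columns,
-- and (when the amount is positive) both column indices in range
def pvMoveOK (L : Nat) (m : String) : Bool :=
  match pvMoveFields m with
  | some (n, a, t) =>
    !(decide (0 < n)) ||
      (decide (-(L:Int) ≤ a - 1) && decide (a - 1 < (L:Int)) &&
       decide (-(L:Int) ≤ t - 1) && decide (t - 1 < (L:Int)))
  | none => false

def pvEntry? (row : List Char) (i : Nat) : Option Char :=
  match row[i]? with
  | some c => if PySem.Chars.isspace c then none else some c
  | none => none

def pvInitHeight (rows : List String) (j : Nat) : Nat :=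
  rows.countP (fun s => (pvEntry? s.toList (1 + 4 * j)).isSome)

-- stack heights along the moves: every pop is covered and every final stack is nonempty
-- (whether A's pops raise depends on the run; this tracks only the stack HEIGHTS, not their contents)
def pvHeightsOK (L : Nat) : List Int → List String → Bool
  | hs, [] => hs.all (fun h => decide (1 ≤ h))
  | hs, m :: ms =>
    match pvMoveFields m with
    | some (n, a, t) =>
      if 0 < n then
        let ra := pvResolve L (a - 1)
        let rt := pvResolve L (t - 1)
        let hs1 := hs.set ra (hs.getD ra 0 - n)
        decide (n ≤ hs.getD ra 0) && pvHeightsOK L (hs1.set rt (hs1.getD rt 0 + n)) ms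
      else pvHeightsOK L hs ms
    | none => pvHeightsOK L hs ms

-- the stack count read by A and B: int() of the last character of the numbering line
def pvLimit? (header : List String) : Option Nat :=
  match header.getLast? with
  | none => none
  | some last =>
    match last.toList.getLast? with
    | none => none
    | some c => (PySem.Int.ofStr? (String.ofList [c])).map Int.toNat

-- Pre_ excludes move lines whose column fields do not parse as ints (A never evaluates them
-- when the amount is not positive; eager B raises ValueError there); everything else it
-- excludes is where A itself raises.
def pvPreB (lines : List String) : Bool :=
  let k := lines.idxOf ""
  decide (1 ≤ k) &&
  (match pvLimit? (lines.take k) with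
   | none => false
   | some L =>
     ((lines.take k).all (fun s => decide ((s.toList.length + 2) / 4 ≤ L))) &&
     ((lines.drop (k + 1)).all (pvMoveOK L)) &&
     pvHeightsOK L ((List.range L).map (fun j => (pvInitHeight (lines.take k).dropLast j : Int)))
       (lines.drop (k + 1)))

def Pre_prompt_two (input_lines : List String) : Prop := pvPreB input_lines = true
instance (input_lines : List String) : Decidable (Pre_prompt_two input_lines) := by
  unfold Pre_prompt_two; infer_instance

def pvWitness_prompt_two : List String :=
  ["    [D]", "[N] [C]", "[Z] [M] [P]", " 1   2   3", "",
   "move 1 from 2 to 1", "move 3 from 1 to 3", "move 2 from 2 to 1", "move 1 from 1 to 2"]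

def Spec_prompt_two (input_lines : List String) (out : String) : Prop := out = prompt_two_alt input_lines
instance (input_lines : List String) (out : String) : Decidable (Spec_prompt_two input_lines out) := by
  unfold Spec_prompt_two; infer_instance

-- ===== CLAIM (what is proved, stated in full; the proofs are below) =====
def Claim_equal_prompt_two : Prop := ∀ (input_lines : List String), Dom_prompt_two input_lines → Pre_prompt_two input_lines → Spec_prompt_two input_lines (prompt_two input_lines)

-- ===== LEMMAS AND PROOFS =====

def pvMkc (c : Char) : String := String.ofList [c]

-- char-level bridges
theorem pv_strip_single (c : Char) :
    PySem.Str.strip (String.ofList [c]) = if PySem.Chars.isspace c then "" else String.ofList [c] := by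
  by_cases h : PySem.Chars.isspace c <;>
    simp [PySem.Str.strip, PySem.Chars.strip, PySem.Chars.lstrip, PySem.Chars.rstrip, h, List.dropWhile]

theorem pv_mkc_ne (c : Char) : String.ofList [c] ≠ "" := by
  intro h; have := congrArg String.toList h; simp at this

-- python index resolution on an in-range index
theorem pv_resolve_lt {n : Nat} {i : Int} (h1 : -(n : Int) ≤ i) (h2 : i < n) : pvResolve n i < n := by
  unfold pvResolve; split <;> omega

theorem pv_pyGetD_inRange {α : Type} (xs : List α) (i : Int) (d : α)
    (h1 : -(xs.length : Int) ≤ i) (h2 : i < xs.length) :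
    PySem.List.pyGetD xs i d = xs.getD (pvResolve xs.length i) d := by
  unfold PySem.List.pyGetD PySem.List.pyGet? PySem.List.pyIdx? pvResolve
  by_cases h : 0 ≤ i
  · simp only [if_pos h, if_pos h2]
    have hni : ¬ i < 0 := by omega
    simp [hni, List.getD_eq_getElem?_getD]
  · have hi : i < 0 := by omega
    simp only [if_pos h1, if_neg (by omega : ¬0 ≤ i)]
    have ht : (i + xs.length).toNat = xs.length - (-i).toNat := by omega
    simp [hi, ht, List.getD_eq_getElem?_getD]


theorem pv_pySetD_inRange {α : Type} (xs : List α) (i : Int) (v : α)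
    (h1 : -(xs.length : Int) ≤ i) (h2 : i < xs.length) :
    PySem.List.pySetD xs i v = xs.set (pvResolve xs.length i) v := by
  unfold PySem.List.pySetD PySem.List.pySet? PySem.List.pyIdx? pvResolve
  by_cases h : 0 ≤ i
  · have hni : ¬ i < 0 := by omega
    simp [h, h2, hni]
  · have hi : i < 0 := by omega
    have ht : (i + xs.length).toNat = xs.length - (-i).toNat := by omega
    simp [h, h1, hi, ht]


-- ---- header decomposition ----

theorem pv_prevLine_append (pre suf : List String) (hpre : "" ∉ pre) :
    ∀ p, pvPrevLine (pre ++ "" :: suf) p = pre.getLastD p := by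
  induction pre with
  | nil => intro p; simp [pvPrevLine]
  | cons l pre ih =>
    intro p
    have hl : l ≠ "" := by rintro rfl; exact hpre (List.mem_cons_self ..)
    have h2 := ih (by intro h; exact hpre (List.mem_cons_of_mem _ h)) l
    rw [List.cons_append, pvPrevLine, if_neg hl, h2]
    cases pre with
    | nil => rfl
    | cons a t =>
      obtain ⟨x, hx⟩ := Option.isSome_iff_exists.mp
        (List.getLast?_isSome.mpr (by simp) : (a :: t).getLast?.isSome)
      simp [List.getLastD]


theorem pv_rowsA_append (L : Nat) (pre suf : List String) (hpre : "" ∉ pre) :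
    pvRowsA L (pre ++ "" :: suf) = pre.map (fun l => pvRowLoopA l.toList (List.replicate L "") 1 0) := by
  induction pre with
  | nil => simp [pvRowsA]
  | cons l pre ih =>
    have hl : l ≠ "" := by rintro rfl; exact hpre (List.mem_cons_self ..)
    rw [List.cons_append, pvRowsA, if_neg hl, ih (by intro h; exact hpre (List.mem_cons_of_mem _ h))]
    rfl


theorem pv_movesA_true (ms : List String) : ∀ cols, pvMovesA cols ms true = ms.foldl pvApplyMoveA cols := by
  induction ms with
  | nil => intro cols; rfl
  | cons m ms ih => intro cols; rw [pvMovesA, if_pos rfl, ih]; rfl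


theorem pv_movesA_append (pre suf : List String) (hpre : "" ∉ pre) (cols : List (List String)) :
    pvMovesA cols (pre ++ "" :: suf) false = suf.foldl pvApplyMoveA cols := by
  induction pre generalizing cols with
  | nil => rw [List.nil_append, pvMovesA, if_neg (by simp)]; simp [pv_movesA_true]
  | cons l pre ih =>
    have hl : l ≠ "" := by rintro rfl; exact hpre (List.mem_cons_self ..)
    rw [List.cons_append, pvMovesA, if_neg (by simp)]
    have : (l == "") = false := by simp [hl]
    rw [this]
    exact ih (by intro h; exact hpre (List.mem_cons_of_mem _ h)) cols


-- ---- the crate rows ----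

theorem pv_getD_set_ne {α : Type} (xs : List α) (j m : Nat) (v d : α) (h : j ≠ m) :
    (xs.set j v).getD m d = xs.getD m d := by
  simp [List.getD_eq_getElem?_getD, List.getElem?_set_ne h]

theorem pv_getD_set_self {α : Type} (xs : List α) (m : Nat) (v d : α) (h : m < xs.length) :
    (xs.set m v).getD m d = v := by
  simp [List.getD_eq_getElem?_getD, h]

theorem pv_rowLoop_length (row : List Char) (stack : List String) (i j : Nat) :
    (pvRowLoopA row stack i j).length = stack.length := by
  fun_induction pvRowLoopA row stack i j with
  | case1 stack i j h ih => rw [ih]; simp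
  | case2 => rfl

theorem pv_rowLoop_getD (row : List Char) (i j : Nat) (stack : List String) (m : Nat) (hij : i = 1 + 4 * j) :
    (pvRowLoopA row stack i j).getD m "" =
      match row[1 + 4 * m]? with
      | some c => if j ≤ m ∧ m < stack.length then PySem.Str.strip (String.ofList [c]) else stack.getD m ""
      | none => stack.getD m "" := by
  fun_induction pvRowLoopA row stack i j with
  | case1 stack i j h ih =>
    rw [ih (by omega)]
    rcases Nat.lt_trichotomy m j with hm | hm | hm
    · cases hr : row[1 + 4 * m]? with
      | none => exact pv_getD_set_ne _ _ _ _ _ (by omega)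
      | some c =>
        dsimp only
        rw [if_neg (by simp; omega), if_neg (by omega), pv_getD_set_ne _ _ _ _ _ (by omega)]
    · subst hm
      have hsome : row[1 + 4 * m]? = some row[i] := by
        have hidx : 1 + 4 * m = i := by omega
        rw [hidx]; exact List.getElem?_eq_getElem h
      rw [hsome]
      dsimp only
      rw [if_neg (by omega)]
      by_cases hlen : m < stack.length
      · rw [if_pos ⟨le_refl m, hlen⟩, pv_getD_set_self _ _ _ _ hlen]
      · rw [if_neg (by omega), List.set_eq_of_length_le (by omega)]
    · cases hr : row[1 + 4 * m]? with
      | none => exact pv_getD_set_ne _ _ _ _ _ (by omega)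
      | some c =>
        dsimp only
        by_cases hlen : m < stack.length
        · rw [if_pos (by simp; omega), if_pos ⟨by omega, hlen⟩]
        · rw [if_neg (by simp; omega), if_neg (by omega), pv_getD_set_ne _ _ _ _ _ (by omega)]
  | case2 stack i j h =>
    cases hr : row[1 + 4 * m]? with
    | none => rfl
    | some c =>
      dsimp only
      obtain ⟨hlt, -⟩ := List.getElem?_eq_some_iff.mp hr
      rw [if_neg (by omega)]

def pvEntryS (row : List Char) (j : Nat) : String :=
  match pvEntry? row (1 + 4 * j) with
  | some c => String.ofList [c]
  | none => ""

theorem pv_row_spec (row : List Char) (L : Nat) :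
    pvRowLoopA row (List.replicate L "") 1 0 = (List.range L).map (fun j => pvEntryS row j) := by
  apply List.ext_getElem
  · simp [pv_rowLoop_length]
  · intro n h1 h2
    have hL : n < L := by simpa using h2
    rw [(List.getD_eq_getElem _ "" h1).symm, pv_rowLoop_getD row 1 0 _ n (by norm_num)]
    simp only [List.getElem_map, List.getElem_range]
    unfold pvEntryS pvEntry?
    cases hr : row[1 + 4 * n]? with
    | none => simp
    | some c =>
      dsimp only
      rw [if_pos ⟨Nat.zero_le _, by simpa using hL⟩, pv_strip_single]
      by_cases hs : PySem.Chars.isspace c <;> simp [hs]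

-- ---- the transpose fold (A) vs direct columns (B) ----

theorem pv_addRow_length (row : List String) : ∀ cols j, (pvAddRowA cols row j).length = cols.length := by
  induction row with
  | nil => intro cols j; rfl
  | cons e rest ih =>
    intro cols j
    rw [show pvAddRowA cols (e :: rest) j =
        pvAddRowA (if e = "" then cols else cols.set j (cols.getD j [] ++ [e])) rest (j + 1) from rfl,
      ih]
    split <;> simp

theorem pv_addRow_getD (row : List String) : ∀ (cols : List (List String)) (j m : Nat),
    (pvAddRowA cols row j).getD m [] =
      if j ≤ m ∧ m - j < row.length ∧ m < cols.length then
        cols.getD m [] ++ (if row.getD (m - j) "" = "" then [] else [row.getD (m - j) ""])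
      else cols.getD m [] := by
  induction row with
  | nil =>
    intro cols j m
    rw [show pvAddRowA cols [] j = cols from rfl, if_neg (by simp)]
  | cons e rest ih =>
    intro cols j m
    rw [show pvAddRowA cols (e :: rest) j =
        pvAddRowA (if e = "" then cols else cols.set j (cols.getD j [] ++ [e])) rest (j + 1) from rfl,
      ih]
    by_cases he : e = ""
    · rw [if_pos he]
      rcases Nat.lt_trichotomy m j with hm | hm | hm
      · rw [if_neg (by omega), if_neg (by omega)]
      · subst hm
        rw [if_neg (by omega)]
        by_cases hl : m < cols.length
        · rw [if_pos ⟨le_refl m, by simp, hl⟩]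
          simp [he]
        · rw [if_neg (by intro hcon; exact hl hcon.2.2)]
      · have hidx : m - j = (m - (j + 1)) + 1 := by omega
        rw [hidx]
        simp only [List.getD_cons_succ, List.length_cons]
        have hc : (j + 1 ≤ m ∧ m - (j + 1) < rest.length ∧ m < cols.length) ↔
            (j ≤ m ∧ m - (j + 1) + 1 < rest.length + 1 ∧ m < cols.length) := by omega
        rw [if_congr hc rfl rfl]
    · rw [if_neg he]
      have hlset : (cols.set j (cols.getD j [] ++ [e])).length = cols.length := by simp
      rcases Nat.lt_trichotomy m j with hm | hm | hm
      · rw [if_neg (by rw [hlset]; omega), if_neg (by omega),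
          pv_getD_set_ne _ _ _ _ _ (by omega)]
      · subst hm
        rw [if_neg (by rw [hlset]; omega)]
        by_cases hl : m < cols.length
        · rw [pv_getD_set_self _ _ _ _ hl, if_pos ⟨le_refl m, by simp, hl⟩]
          simp [he]
        · rw [List.set_eq_of_length_le (by omega), if_neg (by intro hcon; exact hl hcon.2.2)]
      · have hidx : m - j = (m - (j + 1)) + 1 := by omega
        rw [hidx]
        simp only [List.getD_cons_succ, List.length_cons, List.length_set]
        have hc : (j + 1 ≤ m ∧ m - (j + 1) < rest.length ∧ m < cols.length) ↔
            (j ≤ m ∧ m - (j + 1) + 1 < rest.length + 1 ∧ m < cols.length) := by omega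
        rw [if_congr hc rfl rfl, pv_getD_set_ne _ _ _ _ _ (by omega)]

theorem pv_foldAdd_length (rows : List (List String)) : ∀ cols,
    (rows.foldl (fun cs row => pvAddRowA cs row 0) cols).length = cols.length := by
  induction rows with
  | nil => intro cols; rfl
  | cons r rows ih =>
    intro cols
    rw [List.foldl_cons, ih, pv_addRow_length]

theorem pv_foldAdd_getD (rows : List (List String)) : ∀ (cols : List (List String)) (m : Nat),
    (∀ r ∈ rows, r.length = cols.length) →
    (rows.foldl (fun cs row => pvAddRowA cs row 0) cols).getD m [] =
      cols.getD m [] ++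
        (rows.map (fun r => if r.getD m "" = "" then [] else [r.getD m ""])).flatten := by
  induction rows with
  | nil => intro cols m _; simp
  | cons r rows ih =>
    intro cols m hlen
    rw [List.foldl_cons, ih _ m (by intro r' hr'; rw [pv_addRow_length]; exact hlen r' (List.mem_cons_of_mem _ hr')),
      pv_addRow_getD]
    have hrl : r.length = cols.length := hlen r (List.mem_cons_self ..)
    by_cases hl : m < cols.length
    · rw [if_pos ⟨Nat.zero_le _, by omega, hl⟩]
      simp [List.append_assoc]
    · rw [if_neg (by omega)]
      simp [List.getElem?_eq_none (show r.length ≤ m by omega)]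

theorem pv_pyRange_step4 (z : Int) :
    PySem.List.pyRange 1 (4 * z) 4 = (List.range z.toNat).map (fun j : Nat => (1 + 4 * (j : Int))) := by
  rw [PySem.List.pyRange_of_pos _ _ (by norm_num)]
  by_cases h : (1:Int) < 4 * z
  · rw [if_pos h, show (4 * z - 1 + 4 - 1) / 4 = z by omega]
  · rw [if_neg h, show z.toNat = 0 by omega]

theorem pv_flatten_toList {α β : Type} (l : List α) (F : α → Option β) :
    (l.map (fun x => (F x).toList)).flatten = l.filterMap F := by
  induction l with
  | nil => rfl
  | cons a t ih => cases hf : F a <;> simp [hf, ih]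

theorem pv_colB_eq (rowsRev : List String) (j : Nat) :
    pvColB rowsRev (1 + 4 * (j : Int)) = rowsRev.filterMap (fun row => pvEntry? row.toList (1 + 4 * j)) := by
  unfold pvColB
  apply List.filterMap_congr
  intro row _
  rw [show (1 + 4 * (j:Int)) = ((1 + 4 * j : Nat) : Int) by push_cast; ring,
    PySem.List.pyGet?_natCast]
  unfold pvEntry?
  cases row.toList[1 + 4 * j]? <;> rfl

-- A's transposed columns are exactly B's directly-built columns, crate by crate
theorem pv_cols_eq (pre' : List String) (L : Nat) :
    ((pre'.reverse.map (fun l => pvRowLoopA l.toList (List.replicate L "") 1 0)).foldl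
        (fun cs row => pvAddRowA cs row 0) (List.replicate L [])) =
      ((PySem.List.pyRange 1 (4 * (L : Int)) 4).map (fun i => pvColB pre'.reverse i)).map (List.map pvMkc) := by
  rw [pv_pyRange_step4, Int.toNat_natCast]
  apply List.ext_getElem
  · rw [pv_foldAdd_length]; simp
  · intro m h1 h2
    have hL : m < L := by
      rw [pv_foldAdd_length] at h1; simpa using h1
    rw [← List.getD_eq_getElem _ [] h1,
      pv_foldAdd_getD _ _ _ (by
        intro r hr
        obtain ⟨l, _, rfl⟩ := List.mem_map.mp hr
        rw [pv_rowLoop_length]; simp)]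
    simp only [List.getElem_map, List.getElem_range, List.map_map, Function.comp_apply]
    rw [pv_colB_eq, List.map_filterMap, ← pv_flatten_toList]
    have hget : (List.replicate L ([] : List String)).getD m [] = [] := by
      simp [List.getD_eq_getElem?_getD, hL]
    rw [hget, List.nil_append]
    congr 1
    apply List.map_congr_left
    intro l _
    simp only [Function.comp_apply]
    rw [pv_row_spec]
    have hgd : ((List.range L).map (fun j => pvEntryS l.toList j)).getD m "" = pvEntryS l.toList m := by
      rw [List.getD_eq_getElem _ "" (by simpa using hL)]
      simp
    rw [hgd]
    unfold pvEntryS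
    cases hr : pvEntry? l.toList (1 + 4 * m) with
    | none => simp
    | some c =>
      dsimp only
      rw [if_neg (pv_mkc_ne c)]
      rfl

-- ---- the moves ----

theorem pv_set_getD_self (cols : List (List String)) (r : Nat) (h : r < cols.length) :
    cols.set r (cols.getD r []) = cols := by
  rw [List.getD_eq_getElem _ _ h, List.set_getElem_self]

theorem pv_popLoop_spec (fc : String) : ∀ (k : Nat) (cols : List (List String)) (stack : List String) (r : Nat),
    pvResolve cols.length ((PySem.Int.ofStr? fc).getD 0 - 1) = r →
    -(cols.length : Int) ≤ (PySem.Int.ofStr? fc).getD 0 - 1 →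
    (PySem.Int.ofStr? fc).getD 0 - 1 < (cols.length : Int) →
    k ≤ (cols.getD r []).length →
    pvPopLoopA fc k (cols, stack) =
      (cols.set r ((cols.getD r []).take ((cols.getD r []).length - k)),
       stack ++ ((cols.getD r []).drop ((cols.getD r []).length - k)).reverse) := by
  intro k
  induction k with
  | zero =>
    intro cols stack r hr h1 h2 _
    have hrlt : r < cols.length := hr ▸ pv_resolve_lt h1 h2
    rw [show pvPopLoopA fc 0 (cols, stack) = (cols, stack) from rfl]
    rw [Nat.sub_zero, List.take_length, List.drop_length, pv_set_getD_self _ _ hrlt]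
    simp
  | succ k ih =>
    intro cols stack r hr h1 h2 hk
    have hrlt : r < cols.length := hr ▸ pv_resolve_lt h1 h2
    obtain ⟨cs, x, hcx⟩ : ∃ cs x, cols.getD r [] = cs ++ [x] := by
      rcases List.eq_nil_or_concat (cols.getD r []) with h | ⟨cs, x, h⟩
      · rw [h] at hk; simp at hk
      · exact ⟨cs, x, by rw [h, List.concat_eq_append]⟩
    have hclen : (cols.getD r []).length = cs.length + 1 := by rw [hcx]; simp
    rw [show pvPopLoopA fc (k+1) (cols, stack) =
      pvPopLoopA fc k (PySem.List.pySetD cols ((PySem.Int.ofStr? fc).getD 0 - 1)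
          (PySem.List.pyGetD cols ((PySem.Int.ofStr? fc).getD 0 - 1) []).dropLast,
        stack ++ [(PySem.List.pyGetD cols ((PySem.Int.ofStr? fc).getD 0 - 1) []).getLastD ""]) from rfl]
    rw [pv_pyGetD_inRange _ _ _ h1 h2, pv_pySetD_inRange _ _ _ h1 h2, hr, hcx,
      List.dropLast_concat, List.getLastD_concat]
    have hlen1 : (cols.set r cs).length = cols.length := by simp
    have hgd1 : (cols.set r cs).getD r [] = cs := pv_getD_set_self _ _ _ _ (by omega)
    rw [ih (cols.set r cs) (stack ++ [x]) r (by rw [hlen1]; exact hr) (by rw [hlen1]; exact h1)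
      (by rw [hlen1]; exact h2) (by rw [hgd1]; omega)]
    rw [hgd1, List.set_set, Prod.mk.injEq]
    constructor
    · congr 1
      rw [show (cs ++ [x]).length - (k + 1) = cs.length - k by simp,
        List.take_append_of_le_length (by omega)]
    · rw [show (cs ++ [x]).length - (k + 1) = cs.length - k by simp,
        List.drop_append_of_le_length (by omega), List.reverse_append]
      simp

theorem pv_pushLoop_spec (tc : String) : ∀ (stack : List String) (cols : List (List String)) (r : Nat),
    pvResolve cols.length ((PySem.Int.ofStr? tc).getD 0 - 1) = r →
    -(cols.length : Int) ≤ (PySem.Int.ofStr? tc).getD 0 - 1 →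
    (PySem.Int.ofStr? tc).getD 0 - 1 < (cols.length : Int) →
    pvPushLoopA tc stack.length (cols, stack) =
      (cols.set r ((cols.getD r []) ++ stack.reverse), []) := by
  intro stack
  induction stack using List.reverseRecOn with
  | nil =>
    intro cols r hr h1 h2
    have hrlt : r < cols.length := hr ▸ pv_resolve_lt h1 h2
    rw [show pvPushLoopA tc [].length (cols, []) = (cols, []) from rfl]
    rw [List.reverse_nil, List.append_nil, pv_set_getD_self _ _ hrlt]
  | append_singleton ys y ih =>
    intro cols r hr h1 h2
    have hrlt : r < cols.length := hr ▸ pv_resolve_lt h1 h2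
    have hlc : (ys ++ [y]).length = ys.length + 1 := by simp
    rw [hlc]
    rw [show pvPushLoopA tc (ys.length + 1) (cols, ys ++ [y]) =
      pvPushLoopA tc ys.length (PySem.List.pySetD cols ((PySem.Int.ofStr? tc).getD 0 - 1)
          ((PySem.List.pyGetD cols ((PySem.Int.ofStr? tc).getD 0 - 1) []) ++ [(ys ++ [y]).getLastD ""]),
        (ys ++ [y]).dropLast) from rfl]
    rw [pv_pyGetD_inRange _ _ _ h1 h2, pv_pySetD_inRange _ _ _ h1 h2, hr,
      List.dropLast_concat, List.getLastD_concat]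
    have hlen1 : (cols.set r (cols.getD r [] ++ [y])).length = cols.length := by simp
    have hgd1 : (cols.set r (cols.getD r [] ++ [y])).getD r [] = cols.getD r [] ++ [y] :=
      pv_getD_set_self _ _ _ _ (by omega)
    rw [ih (cols.set r (cols.getD r [] ++ [y])) r (by rw [hlen1]; exact hr)
      (by rw [hlen1]; exact h1) (by rw [hlen1]; exact h2)]
    rw [hgd1, List.set_set, List.reverse_append]
    simp

theorem pv_pushLoop_spec' (tc : String) (k : Nat) (stack : List String) (cols : List (List String)) (r : Nat)
    (hklen : k = stack.length)
    (hr : pvResolve cols.length ((PySem.Int.ofStr? tc).getD 0 - 1) = r)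
    (h1 : -(cols.length : Int) ≤ (PySem.Int.ofStr? tc).getD 0 - 1)
    (h2 : (PySem.Int.ofStr? tc).getD 0 - 1 < (cols.length : Int)) :
    pvPushLoopA tc k (cols, stack) = (cols.set r ((cols.getD r []) ++ stack.reverse), []) := by
  subst hklen
  exact pv_pushLoop_spec tc stack cols r hr h1 h2

def pvHeights (sts : List (List Char)) : List Int := sts.map (fun s => ((s.length : Nat) : Int))

theorem pv_getD_map (sts : List (List Char)) (r : Nat) :
    (sts.map (List.map pvMkc)).getD r [] = (sts.getD r []).map pvMkc := by
  simp only [List.getD_eq_getElem?_getD, List.getElem?_map]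
  cases sts[r]? <;> rfl

theorem pv_heights_getD (sts : List (List Char)) (r : Nat) :
    (pvHeights sts).getD r 0 = ((sts.getD r []).length : Int) := by
  simp only [pvHeights, List.getD_eq_getElem?_getD, List.getElem?_map]
  cases sts[r]? <;> rfl

theorem pv_moveFields_some (m : String) (n a t : Int) (h : pvMoveFields m = some (n, a, t)) :
    ∃ w0 a1 w2 a3 w4 a5, PySem.Str.split? m " " = some [w0, a1, w2, a3, w4, a5] ∧
      PySem.Int.ofStr? a1 = some n ∧ PySem.Int.ofStr? a3 = some a ∧ PySem.Int.ofStr? a5 = some t := by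
  unfold pvMoveFields at h
  cases hsp : PySem.Str.split? m " " with
  | none => rw [hsp] at h; simp at h
  | some ws =>
    rw [hsp] at h
    rcases ws with _ | ⟨w0, _ | ⟨a1, _ | ⟨w2, _ | ⟨a3, _ | ⟨w4, _ | ⟨a5, _ | ⟨w6, rest⟩⟩⟩⟩⟩⟩⟩ <;>
      try simp at h
    cases ho1 : PySem.Int.ofStr? a1 <;> rw [ho1] at h
    all_goals cases ho3 : PySem.Int.ofStr? a3 <;> rw [ho3] at h
    all_goals cases ho5 : PySem.Int.ofStr? a5 <;> rw [ho5] at h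
    all_goals simp at h
    obtain ⟨rfl, rfl, rfl⟩ := h
    exact ⟨w0, a1, w2, a3, w4, a5, rfl, ho1, ho3, ho5⟩

-- the net effect of one crane move on the columns
def pvDoMove (sts : List (List Char)) (ra rt k : Nat) : List (List Char) :=
  let col := sts.getD ra []
  let sts1 := sts.set ra (col.take (col.length - k))
  sts1.set rt (sts1.getD rt [] ++ col.drop (col.length - k))

theorem pv_moveB_char (sts : List (List Char)) (m : String) (n a t : Int)
    (w0 a1 w2 a3 w4 a5 : String)
    (hsp : PySem.Str.split? m " " = some [w0, a1, w2, a3, w4, a5])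
    (ho1 : PySem.Int.ofStr? a1 = some n) (ho3 : PySem.Int.ofStr? a3 = some a)
    (ho5 : PySem.Int.ofStr? a5 = some t) (hn : 0 < n)
    (hb1 : -(sts.length : Int) ≤ a - 1) (hb2 : a - 1 < sts.length)
    (hb3 : -(sts.length : Int) ≤ t - 1) (hb4 : t - 1 < sts.length) :
    pvApplyMoveB sts m =
      pvDoMove sts (pvResolve sts.length (a - 1)) (pvResolve sts.length (t - 1)) n.toNat := by
  have hk : ((n.toNat : Nat) : Int) = n := by omega
  have hkpos : 0 < n.toNat := by omega
  simp only [pvApplyMoveB, hsp, Option.getD_some]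
  rw [show PySem.List.pyGetD [w0, a1, w2, a3, w4, a5] 1 "" = a1 from rfl,
    show PySem.List.pyGetD [w0, a1, w2, a3, w4, a5] 3 "" = a3 from rfl,
    show PySem.List.pyGetD [w0, a1, w2, a3, w4, a5] 5 "" = a5 from rfl,
    ho1, ho3, ho5]
  simp only [Option.getD_some]
  rw [if_pos hn]
  rw [pv_pyGetD_inRange _ _ _ hb1 hb2, pv_pySetD_inRange _ _ _ hb1 hb2]
  rw [show (-n) = -((n.toNat : Nat) : Int) by omega]
  rw [PySem.List.slice_from_neg_natCast _ _ hkpos, PySem.List.slice_to_neg_natCast _ _ hkpos]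
  rw [pv_pyGetD_inRange _ _ _ (by simpa using hb3) (by simpa using hb4),
    pv_pySetD_inRange _ _ _ (by simpa using hb3) (by simpa using hb4)]
  simp only [List.length_set]
  rfl

theorem pv_moveA_char (sts : List (List Char)) (m : String) (n a t : Int)
    (w0 a1 w2 a3 w4 a5 : String)
    (hsp : PySem.Str.split? m " " = some [w0, a1, w2, a3, w4, a5])
    (ho1 : PySem.Int.ofStr? a1 = some n) (ho3 : PySem.Int.ofStr? a3 = some a)
    (ho5 : PySem.Int.ofStr? a5 = some t) (hn : 0 < n)
    (hb1 : -(sts.length : Int) ≤ a - 1) (hb2 : a - 1 < sts.length)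
    (hb3 : -(sts.length : Int) ≤ t - 1) (hb4 : t - 1 < sts.length)
    (hle : (n.toNat : Nat) ≤ (sts.getD (pvResolve sts.length (a - 1)) []).length) :
    pvApplyMoveA (sts.map (List.map pvMkc)) m =
      (pvDoMove sts (pvResolve sts.length (a - 1)) (pvResolve sts.length (t - 1)) n.toNat).map
        (List.map pvMkc) := by
  have hmaplen : (sts.map (List.map pvMkc)).length = sts.length := by simp
  simp only [pvApplyMoveA, hsp, ho1, Option.getD_some]
  set ra := pvResolve sts.length (a - 1) with hra_def
  set rt := pvResolve sts.length (t - 1) with hrt_def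
  set col := sts.getD ra [] with hcol_def
  rw [pv_popLoop_spec a3 n.toNat (sts.map (List.map pvMkc)) [] ra
      (by rw [ho3, Option.getD_some, hmaplen]) (by rw [ho3, Option.getD_some, hmaplen]; exact hb1)
      (by rw [ho3, Option.getD_some, hmaplen]; exact hb2)
      (by rw [pv_getD_map]; simpa using hle)]
  rw [pv_getD_map, ← hcol_def]
  rw [pv_pushLoop_spec' a5 n.toNat _ _ rt
      (by simp; omega)
      (by simp only [List.length_set, hmaplen]; rw [ho5, Option.getD_some])
      (by simp only [List.length_set, hmaplen]; rw [ho5, Option.getD_some]; exact hb3)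
      (by simp only [List.length_set, hmaplen]; rw [ho5, Option.getD_some]; exact hb4)]
  simp only [List.nil_append, List.reverse_reverse, List.length_map]
  unfold pvDoMove
  rw [← hcol_def]
  simp only [← List.map_take, ← List.map_drop, ← List.map_set, pv_getD_map]
  simp [List.map_set, List.map_append]

theorem pv_heights_doMove (sts : List (List Char)) (ra rt : Nat) (n : Int)
    (_hra : ra < sts.length) (_hrt : rt < sts.length) (hn : 0 ≤ n)
    (hk : n.toNat ≤ (sts.getD ra []).length) :
    pvHeights (pvDoMove sts ra rt n.toNat) =
      ((pvHeights sts).set ra ((pvHeights sts).getD ra 0 - n)).set rt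
        (((pvHeights sts).set ra ((pvHeights sts).getD ra 0 - n)).getD rt 0 + n) := by
  rw [List.getD_eq_getElem?_getD] at hk
  have h1 : (pvHeights sts).set ra ((pvHeights sts).getD ra 0 - n) =
      pvHeights (sts.set ra ((sts.getD ra []).take ((sts.getD ra []).length - n.toNat))) := by
    rw [pv_heights_getD]
    unfold pvHeights
    rw [List.map_set]
    congr 1
    simp [List.length_take, List.getD_eq_getElem?_getD]
    omega
  rw [h1, pv_heights_getD]
  unfold pvDoMove pvHeights
  rw [List.map_set]
  congr 1
  simp only [List.length_append, List.length_drop, List.getD_eq_getElem?_getD]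
  push_cast
  omega

theorem pv_moves_fold (L : Nat) : ∀ (ms : List String) (sts : List (List Char)),
    sts.length = L →
    (∀ m ∈ ms, pvMoveOK L m = true) →
    pvHeightsOK L (pvHeights sts) ms = true →
    ms.foldl pvApplyMoveA (sts.map (List.map pvMkc)) = (ms.foldl pvApplyMoveB sts).map (List.map pvMkc) := by
  intro ms
  induction ms with
  | nil => intro sts _ _ _; rfl
  | cons m ms ih =>
    intro sts hlen hok hh
    rw [List.foldl_cons, List.foldl_cons]
    cases hmf : pvMoveFields m with
    | none => exact absurd (hok m (List.mem_cons_self ..)) (by simp [pvMoveOK, hmf])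
    | some nat3 =>
      obtain ⟨n, a, t⟩ := nat3
      obtain ⟨w0, a1, w2, a3, w4, a5, hsp, ho1, ho3, ho5⟩ := pv_moveFields_some m n a t hmf
      by_cases hn : 0 < n
      · have hbounds := hok m (List.mem_cons_self ..)
        rw [pvMoveOK, hmf] at hbounds
        simp only [hn, decide_true, Bool.not_true, Bool.false_or, Bool.and_eq_true,
          decide_eq_true_eq] at hbounds
        obtain ⟨⟨⟨hb1, hb2⟩, hb3⟩, hb4⟩ := hbounds
        simp only [pvHeightsOK, hmf, hn, if_true, Bool.and_eq_true, decide_eq_true_eq] at hh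
        obtain ⟨hle, hh2⟩ := hh
        rw [pv_heights_getD] at hle
        have hb1' : -(sts.length : Int) ≤ a - 1 := by rw [hlen]; exact hb1
        have hb2' : a - 1 < (sts.length : Int) := by rw [hlen]; exact hb2
        have hb3' : -(sts.length : Int) ≤ t - 1 := by rw [hlen]; exact hb3
        have hb4' : t - 1 < (sts.length : Int) := by rw [hlen]; exact hb4
        have hres_a : pvResolve sts.length (a - 1) = pvResolve L (a - 1) := by rw [hlen]
        have hres_t : pvResolve sts.length (t - 1) = pvResolve L (t - 1) := by rw [hlen]
        have hle' : (n.toNat : Nat) ≤ (sts.getD (pvResolve sts.length (a - 1)) []).length := by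
          rw [hres_a]; omega
        rw [pv_moveA_char sts m n a t w0 a1 w2 a3 w4 a5 hsp ho1 ho3 ho5 hn hb1' hb2' hb3' hb4' hle',
          pv_moveB_char sts m n a t w0 a1 w2 a3 w4 a5 hsp ho1 ho3 ho5 hn hb1' hb2' hb3' hb4']
        apply ih
        · unfold pvDoMove; simp [hlen]
        · intro m' hm'; exact hok m' (List.mem_cons_of_mem _ hm')
        · rw [pv_heights_doMove sts _ _ n (by rw [hres_a, ← hlen] at *; exact pv_resolve_lt hb1' hb2')
            (by rw [hres_t, ← hlen] at *; exact pv_resolve_lt hb3' hb4') (by omega)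
            (by rw [hres_a]; omega)]
          rw [hres_a, hres_t]
          exact hh2
      · have hA : pvApplyMoveA (sts.map (List.map pvMkc)) m = sts.map (List.map pvMkc) := by
          simp only [pvApplyMoveA, hsp, ho1, Option.getD_some]
          rw [show n.toNat = 0 by omega]
          rfl
        have hB : pvApplyMoveB sts m = sts := by
          simp only [pvApplyMoveB, hsp, Option.getD_some]
          rw [show PySem.List.pyGetD [w0, a1, w2, a3, w4, a5] 1 "" = a1 from rfl, ho1]
          simp only [Option.getD_some]
          rw [if_neg hn]
        rw [hA, hB]
        apply ih sts hlen (fun m' hm' => hok m' (List.mem_cons_of_mem _ hm'))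
        simp only [pvHeightsOK, hmf, hn, if_false] at hh
        exact hh

-- ---- final join ----

theorem pv_last_eq (col : List Char) :
    (col.map pvMkc).getLastD "" = String.ofList (PySem.List.pyGet? col (-1)).toList := by
  rw [PySem.List.pyGet?_neg_one, List.getLastD_eq_getLast?, List.getLast?_map]
  cases hc : col.getLast? with
  | none => rfl
  | some c => rfl

theorem pv_idxOf_append (pre suf : List String) (h : "" ∉ pre) :
    (pre ++ "" :: suf).idxOf "" = pre.length := by
  induction pre with
  | nil => simp
  | cons l pre ih =>
    have hl : ¬ (l == "") = true := by
      simp only [beq_iff_eq]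
      rintro rfl; exact h (List.mem_cons_self ..)
    rw [List.cons_append, List.idxOf_cons, Bool.cond_eq_ite, if_neg hl,
      ih (fun hm => h (List.mem_cons_of_mem _ hm))]
    rfl

theorem pv_dropLast_map (l : List String) (f : String → List String) :
    (l.map f).dropLast = l.dropLast.map f := by
  simp [List.dropLast_eq_take, List.map_take]

theorem pv_heights_init (pre' : List String) (L : Nat) :
    pvHeights ((List.range L).map (fun j : Nat => pvColB pre'.reverse (1 + 4 * (j : Int)))) =
      (List.range L).map (fun j : Nat => (pvInitHeight pre' j : Int)) := by
  unfold pvHeights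
  rw [List.map_map]
  apply List.map_congr_left
  intro j _
  simp only [Function.comp_apply]
  rw [pv_colB_eq, List.length_filterMap_eq_countP]
  unfold pvInitHeight
  rw [List.countP_reverse]

theorem pv_prevLine_nosep (l : List String) (h : "" ∉ l) : ∀ p, pvPrevLine l p = l.getLastD p := by
  induction l with
  | nil => intro p; rfl
  | cons x l ih =>
    intro p
    have hx : x ≠ "" := by rintro rfl; exact h (List.mem_cons_self ..)
    rw [pvPrevLine, if_neg hx, ih (fun hm => h (List.mem_cons_of_mem _ hm)) x]
    cases l with
    | nil => rfl
    | cons a t =>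
      obtain ⟨y, hy⟩ := Option.isSome_iff_exists.mp
        (List.getLast?_isSome.mpr (by simp) : (a :: t).getLast?.isSome)
      simp [List.getLastD, hy]

theorem pv_rowsA_nosep (L : Nat) (l : List String) (h : "" ∉ l) :
    pvRowsA L l = l.map (fun s => pvRowLoopA s.toList (List.replicate L "") 1 0) := by
  induction l with
  | nil => rfl
  | cons x l ih =>
    have hx : x ≠ "" := by rintro rfl; exact h (List.mem_cons_self ..)
    rw [pvRowsA, if_neg hx, ih (fun hm => h (List.mem_cons_of_mem _ hm))]
    rfl

theorem pv_movesA_nosep (l : List String) (h : "" ∉ l) (cols : List (List String)) :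
    pvMovesA cols l false = cols := by
  induction l with
  | nil => rfl
  | cons x l ih =>
    have hx : (x == "") = false :=
      beq_eq_false_iff_ne.mpr (by rintro rfl; exact h (List.mem_cons_self ..))
    rw [pvMovesA, if_neg (by simp), hx, ih (fun hm => h (List.mem_cons_of_mem _ hm))]

-- the shared tail: both ports reduced to the column pipeline over header/move parts
theorem pv_core (lines pre suf : List String) (L : Nat) (z : Int) (last : String) (c : Char)
    (hprev : pvPrevLine lines "" = last)
    (hc : last.toList.getLast? = some c)
    (hof : PySem.Int.ofStr? (String.ofList [c]) = some z)
    (hzL : z.toNat = L)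
    (hrows : (pvRowsA L lines).dropLast =
      pre.dropLast.map (fun l => pvRowLoopA l.toList (List.replicate L "") 1 0))
    (hmovesA : ∀ cols, pvMovesA cols lines false = suf.foldl pvApplyMoveA cols)
    (hB : prompt_two_alt lines =
      PySem.Str.join "" ((suf.foldl pvApplyMoveB
          ((List.range L).map (fun j : Nat => pvColB pre.dropLast.reverse (1 + 4 * (j : Int))))).map
        (fun s => String.ofList (PySem.List.pyGet? s (-1)).toList)))
    (hmoves : ∀ m ∈ suf, pvMoveOK L m = true)
    (hheights : pvHeightsOK L ((List.range L).map
      (fun j : Nat => (pvInitHeight pre.dropLast j : Int))) suf = true) :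
    prompt_two lines = prompt_two_alt lines := by
  set sts0 : List (List Char) :=
    (List.range L).map (fun j : Nat => pvColB pre.dropLast.reverse (1 + 4 * (j : Int))) with hsts0
  have hlimA : pvStackLimitA last = z := by
    unfold pvStackLimitA
    try dsimp only
    rw [List.filter_eq_self.mpr (by
      intro s hs
      obtain ⟨ch, _, rfl⟩ := List.mem_map.mp hs
      simp [pv_mkc_ne ch])]
    rw [PySem.List.pyGet?_neg_one, List.getLast?_map, hc]
    simp only [Option.map_some]
    try dsimp only
    rw [hof]
    rfl
  unfold prompt_two
  dsimp only
  rw [hprev, hlimA, hzL, hrows, hmovesA, ← List.map_reverse]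
  rw [pv_cols_eq pre.dropLast L, pv_pyRange_step4, Int.toNat_natCast]
  simp only [List.map_map]
  rw [← List.map_map,
    show ((fun i => pvColB pre.dropLast.reverse i) ∘ fun j : Nat => 1 + 4 * (j : Int)) =
      (fun j : Nat => pvColB pre.dropLast.reverse (1 + 4 * (j : Int))) from rfl, ← hsts0]
  rw [pv_moves_fold L suf sts0 (by rw [hsts0]; simp)
    (fun m hm => hmoves m hm)
    (by rw [pv_heights_init pre.dropLast L] at *; exact hheights)]
  rw [hB, List.map_map]
  congr 1
  apply List.map_congr_left
  intro col _
  exact pv_last_eq col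

theorem pv_main : ∀ (input_lines : List String), Pre_prompt_two input_lines →
    prompt_two input_lines = prompt_two_alt input_lines := by
  intro lines hpre
  unfold Pre_prompt_two pvPreB at hpre
  simp only [Bool.and_eq_true, decide_eq_true_eq] at hpre
  obtain ⟨hk1, hrest⟩ := hpre
  by_cases hmem' : "" ∈ lines
  -- ===== a blank separator line exists =====
  · obtain ⟨k', hidx⟩ := Option.isSome_iff_exists.mp ((PySem.List.index?_isSome_iff lines "").mpr hmem')
    obtain ⟨pre, suf, hsplit, hklen, hnotin⟩ := (PySem.List.index?_eq_some_iff lines "" k').mp hidx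
    have hkeq : lines.idxOf "" = k' := by rw [hsplit, pv_idxOf_append _ _ hnotin, hklen]
    rw [hkeq] at hrest hk1
    have htake : lines.take k' = pre := by rw [hsplit, List.take_left' hklen]
    have hdrop : lines.drop (k' + 1) = suf := by
      rw [hsplit, show pre ++ "" :: suf = (pre ++ [""]) ++ suf by simp,
        List.drop_left' (by simp [hklen])]
    rw [htake, hdrop] at hrest
    cases hlim : pvLimit? pre with
    | none => rw [hlim] at hrest; simp at hrest
    | some L =>
    rw [hlim] at hrest
    simp only [Bool.and_eq_true, List.all_eq_true, decide_eq_true_eq] at hrest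
    obtain ⟨⟨hlens, hmoves⟩, hheights⟩ := hrest
    have hprene : pre ≠ [] := by
      intro h; rw [h] at hklen; simp at hklen; omega
    obtain ⟨last, hlast⟩ := Option.isSome_iff_exists.mp
      (List.getLast?_isSome.mpr hprene : pre.getLast?.isSome)
    unfold pvLimit? at hlim
    rw [hlast] at hlim
    dsimp only at hlim
    cases hc : last.toList.getLast? with
    | none => rw [hc] at hlim; simp at hlim
    | some c =>
    rw [hc] at hlim
    dsimp only at hlim
    cases hof : PySem.Int.ofStr? (String.ofList [c]) with
    | none => rw [hof] at hlim; simp at hlim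
    | some z =>
    rw [hof] at hlim
    have hzL : z.toNat = L := by simpa using hlim
    have hcont : lines.contains "" = true := by
      simpa using hmem'
    refine pv_core lines pre suf L z last c ?_ hc hof hzL ?_ ?_ ?_ hmoves hheights
    · rw [hsplit, pv_prevLine_append _ _ hnotin, List.getLastD_eq_getLast?, hlast]
      rfl
    · rw [hsplit, pv_rowsA_append _ _ _ hnotin, pv_dropLast_map]
    · intro cols; rw [hsplit, pv_movesA_append _ _ hnotin]
    · unfold prompt_two_alt
      rw [if_pos hcont, hidx]
      dsimp only [Option.getD_some]
      rw [PySem.List.slice_to_natCast, htake, PySem.List.pyGet?_neg_one, hlast]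
      dsimp only
      rw [PySem.List.pyGet?_neg_one, hc]
      dsimp only
      rw [hof]
      dsimp only [Option.getD_some]
      rw [PySem.List.slice_to_neg_one, pv_pyRange_step4, hzL,
        PySem.List.slice_from _ (by omega : (0:Int) ≤ (k' : Int) + 1),
        show (((k' : Int) + 1)).toNat = k' + 1 by omega, hdrop]
      simp only [List.map_map]
      rfl
  -- ===== no blank separator: the whole input is the drawing, there are no moves =====
  · have hkeq : lines.idxOf "" = lines.length := List.idxOf_eq_length_iff.mpr hmem'
    rw [hkeq] at hrest hk1
    have htake : lines.take lines.length = lines := List.take_length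
    have hdrop : lines.drop (lines.length + 1) = [] := List.drop_eq_nil_of_le (by omega)
    rw [htake, hdrop] at hrest
    cases hlim : pvLimit? lines with
    | none => rw [hlim] at hrest; simp at hrest
    | some L =>
    rw [hlim] at hrest
    simp only [Bool.and_eq_true, List.all_eq_true, decide_eq_true_eq] at hrest
    obtain ⟨⟨hlens, hmoves⟩, hheights⟩ := hrest
    have hprene : lines ≠ [] := by
      intro h; rw [h] at hk1; simp at hk1
    obtain ⟨last, hlast⟩ := Option.isSome_iff_exists.mp
      (List.getLast?_isSome.mpr hprene : lines.getLast?.isSome)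
    unfold pvLimit? at hlim
    rw [hlast] at hlim
    dsimp only at hlim
    cases hc : last.toList.getLast? with
    | none => rw [hc] at hlim; simp at hlim
    | some c =>
    rw [hc] at hlim
    dsimp only at hlim
    cases hof : PySem.Int.ofStr? (String.ofList [c]) with
    | none => rw [hof] at hlim; simp at hlim
    | some z =>
    rw [hof] at hlim
    have hzL : z.toNat = L := by simpa using hlim
    have hcont : lines.contains "" = false := by
      simp only [List.contains_eq_mem, decide_eq_false_iff_not]
      exact hmem'
    refine pv_core lines lines [] L z last c ?_ hc hof hzL ?_ ?_ ?_ (by simp) (by simpa using hheights)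
    · rw [pv_prevLine_nosep lines hmem' "", List.getLastD_eq_getLast?, hlast]
      rfl
    · rw [pv_rowsA_nosep L lines hmem', pv_dropLast_map]
    · intro cols
      rw [pv_movesA_nosep lines hmem' cols]
      rfl
    · unfold prompt_two_alt
      rw [if_neg (by rw [hcont]; simp)]
      dsimp only
      rw [PySem.List.slice_to_natCast, htake, PySem.List.pyGet?_neg_one, hlast]
      dsimp only
      rw [PySem.List.pyGet?_neg_one, hc]
      dsimp only
      rw [hof]
      dsimp only [Option.getD_some]
      rw [PySem.List.slice_to_neg_one, pv_pyRange_step4, hzL,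
        PySem.List.slice_from _ (by omega : (0:Int) ≤ (lines.length : Int) + 1),
        show (((lines.length : Int) + 1)).toNat = lines.length + 1 by omega, hdrop]
      simp only [List.map_map]
      rfl

-- ===== VERDICT (by name: the statement is the Claim_ definition above) =====
theorem prompt_two_spec : Claim_equal_prompt_two := by
  intro l _ hp
  exact pv_main l hp
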